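-- pv_equiv track=rewrite | github.com/pypi-data/pypi-mirror-403 | packages/grok-mcp/grok_mcp-0.1.0-py3-none-any.whl/grok_mcp/response_formatter.py | _extract_posts
-- ===== SOURCE A (Python) =====
-- from typing import Any, Dict, List, Optional, Union
--
-- def _extract_posts(content: str) -> List[Dict[str, Any]]:
--     """Extract post information from content."""
--     posts = []
--
--     # Try to find structured post data in the content
--     # This is a simplified parser - in reality, Grok would provide structured data
--     lines = content.split('\n')
--     current_post = {}
--
--     for line in lines:
--         line = line.strip()
--         if not line:
--             if current_post:
--                 posts.append(current_post)
--                 current_post = {}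
--             continue
--
--         # Look for patterns that indicate post metadata
--         if line.startswith('@'):
--             current_post['author'] = line.split()[0]
--             current_post['content'] = ' '.join(line.split()[1:])
--         elif 'likes:' in line.lower() or 'retweets:' in line.lower():
--             current_post['engagement'] = line
--         elif any(keyword in line.lower() for keyword in ['posted', 'tweeted', 'ago']):
--             current_post['timestamp'] = line
--         else:
--             if 'content' in current_post:
--                 current_post['content'] += ' ' + line
--             else:
--                 current_post['content'] = line
--
--     # Add the last post if it exists
--     if current_post:
--         posts.append(current_post)
--
--     return posts
-- ===== SOURCE B (Python) =====
-- def _build_post(block):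
--     post = {}
--     for line in block:
--         if line.startswith('@'):
--             words = line.split()
--             post['author'] = words[0]
--             post['content'] = ' '.join(words[1:])
--         elif 'likes:' in line.lower() or 'retweets:' in line.lower():
--             post['engagement'] = line
--         elif any(k in line.lower() for k in ('posted', 'tweeted', 'ago')):
--             post['timestamp'] = line
--         else:
--             if 'content' in post:
--                 post['content'] = post['content'] + ' ' + line
--             else:
--                 post['content'] = line
--     return post
--
--
-- def _extract_posts(content):
--     lines = [l.strip() for l in content.split('\n')]
--     posts = []
--     i, n = 0, len(lines)
--     while i < n:
--         if not lines[i]: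
--             i += 1
--             continue
--         j = i
--         while j < n and lines[j]:
--             j += 1
--         posts.append(_build_post(lines[i:j]))
--         i = j
--     return posts
-- ===== Notes on version B (the rewrite author's own statement) =====
-- stated objective: alternative
-- what changed: Replaces A's single pass with flush-on-blank accumulator state (current_post carried across lines, flushed on blanks and once more at the end) by a two-pointer segmentation of the stripped lines into maximal non-blank blocks followed by an independent per-block dict build.
import Mathlib
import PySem

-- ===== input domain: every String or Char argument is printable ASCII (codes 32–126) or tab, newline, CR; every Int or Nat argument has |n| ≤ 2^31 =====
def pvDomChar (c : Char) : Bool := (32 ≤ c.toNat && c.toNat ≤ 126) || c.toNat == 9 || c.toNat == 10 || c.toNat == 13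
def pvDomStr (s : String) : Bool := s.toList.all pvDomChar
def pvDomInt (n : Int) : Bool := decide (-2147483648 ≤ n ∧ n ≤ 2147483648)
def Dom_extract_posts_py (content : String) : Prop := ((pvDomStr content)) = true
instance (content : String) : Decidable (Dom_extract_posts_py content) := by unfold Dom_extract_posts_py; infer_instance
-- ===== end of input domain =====

-- B replaces A's flush-on-blank accumulator with a two-pointer segmentation into blocks
-- followed by an independent per-block dict build (objective: simpler decomposition, same cost).

-- ===== PORT A =====
-- the shared per-line branch body (textually identical in both Pythons' loop bodies)
def postStep (d : PySem.Dict String String) (line : String) : PySem.Dict String String :=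
  if PySem.Str.startswith line "@" then
    let words := PySem.Str.split₀ line
    let d := d.insert "author" ((PySem.List.pyGet? words 0).getD "")  -- words ≠ [] here (line stripped, nonblank)
    d.insert "content" (PySem.Str.join " " (PySem.List.slice words (some 1) none))
  else if PySem.Str.isIn "likes:" (PySem.Str.lower line) || PySem.Str.isIn "retweets:" (PySem.Str.lower line) then
    d.insert "engagement" line
  else if ["posted", "tweeted", "ago"].any (fun k => PySem.Str.isIn k (PySem.Str.lower line)) then
    d.insert "timestamp" line
  else if d.contains "content" then
    d.insert "content" (d.getD "content" "" ++ " " ++ line)  -- key present: getD never uses the default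
  else
    d.insert "content" line

-- A's loop body: strip, flush on blank, else feed the line to the branch body
def loopStep (st : List (PySem.Dict String String) × PySem.Dict String String)
    (rawline : String) : List (PySem.Dict String String) × PySem.Dict String String :=
  let line := PySem.Str.strip rawline
  if line = "" then
    if st.2.items.isEmpty then st else (st.1 ++ [st.2], PySem.Dict.empty)
  else
    (st.1, postStep st.2 line)

-- A's trailing "add the last post if it exists"
def flushLast (st : List (PySem.Dict String String) × PySem.Dict String String) :
    List (PySem.Dict String String) :=
  if st.2.items.isEmpty then st.1 else st.1 ++ [st.2]

def extract_posts_py (content : String) : List (List (String × String)) :=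
  -- lines = content.split('\n'); '\n' ≠ "" so split? is never none
  (flushLast ((((PySem.Str.split? content "\n").getD []).foldl loopStep
    ([], PySem.Dict.empty)))).map PySem.Dict.items

-- ===== PORT B =====
def buildPost (block : List String) : PySem.Dict String String :=
  block.foldl postStep PySem.Dict.empty

-- the outer two-pointer scan: skip blanks, take a maximal run of non-blank lines
def segs : List String → List (List String)
  | [] => []
  | l :: ls =>
    if l = "" then segs ls
    else (l :: ls.takeWhile (· ≠ "")) :: segs (ls.dropWhile (· ≠ ""))
termination_by ls => ls.length
decreasing_by
  · simp
  · exact Nat.lt_succ_of_le (List.length_dropWhile_le _ _)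

def extract_posts_py_alt (content : String) : List (List (String × String)) :=
  -- lines = [l.strip() for l in content.split('\n')]
  (segs (((PySem.Str.split? content "\n").getD []).map PySem.Str.strip)).map
    (fun b => (buildPost b).items)

-- ===== PRECONDITION & SPEC =====
def Spec_extract_posts_py (content : String) (out : List (List (String × String))) : Prop := out = extract_posts_py_alt content
instance (content : String) (out : List (List (String × String))) : Decidable (Spec_extract_posts_py content out) := by unfold Spec_extract_posts_py; infer_instance

-- ===== CLAIM (what is proved, stated in full; the proofs are below) =====
def Claim_equal_extract_posts_py : Prop := ∀ (content : String), Dom_extract_posts_py content → Spec_extract_posts_py content (extract_posts_py content)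

-- ===== LEMMAS AND PROOFS =====

theorem postStep_items_ne_nil (d : PySem.Dict String String) (l : String) :
    (postStep d l).items ≠ [] := by
  have ins : ∀ (d : PySem.Dict String String) (k v : String), (d.insert k v).items ≠ [] := by
    intro d k v
    rcases d with ⟨items⟩
    cases items <;> simp [PySem.Dict.insert, PySem.Dict.contains]
    split <;> simp
  unfold postStep
  split
  · exact ins _ _ _
  · split
    · exact ins _ _ _
    · split
      · exact ins _ _ _
      · split <;> exact ins _ _ _

-- A's loop, as a recursive function over already-stripped lines with current dict `cur`
def runA : List String → PySem.Dict String String → List (PySem.Dict String String)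
  | [], cur => if cur.items.isEmpty then [] else [cur]
  | l :: ls, cur =>
    if l = "" then
      if cur.items.isEmpty then runA ls cur else cur :: runA ls PySem.Dict.empty
    else runA ls (postStep cur l)

theorem foldl_eq_runA (ls : List String) (posts : List (PySem.Dict String String))
    (cur : PySem.Dict String String) :
    flushLast (ls.foldl loopStep (posts, cur)) = posts ++ runA (ls.map PySem.Str.strip) cur := by
  induction ls generalizing posts cur with
  | nil =>
    simp only [List.foldl_nil, List.map_nil, runA, flushLast]
    split <;> simp
  | cons l ls ih =>
    simp only [List.foldl_cons, List.map_cons, runA, loopStep]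
    by_cases hl : PySem.Str.strip l = ""
    · rw [if_pos hl, if_pos hl]
      by_cases hc : cur.items.isEmpty
      · rw [if_pos hc, if_pos hc, ih]
      · rw [if_neg hc, if_neg hc, ih, List.append_assoc]
        rfl
    · rw [if_neg hl, if_neg hl, ih]

theorem runA_segs : ∀ ls : List String,
    (runA ls PySem.Dict.empty = (segs ls).map buildPost) ∧
    (∀ d : PySem.Dict String String, d.items ≠ [] →
      runA ls d = ((ls.takeWhile (· ≠ "")).foldl postStep d)
        :: (segs (ls.dropWhile (· ≠ ""))).map buildPost) := by
  intro ls
  induction ls with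
  | nil =>
    constructor
    · simp [runA, segs, PySem.Dict.empty]
    · intro d hd
      simp [runA, segs, List.isEmpty_iff, hd]
  | cons l ls ih =>
    have hemp : (PySem.Dict.empty : PySem.Dict String String).items.isEmpty = true := rfl
    constructor
    · by_cases hl : l = ""
      · subst hl
        show (if "" = "" then _ else _) = _
        rw [if_pos rfl, if_pos hemp]
        simpa [segs] using ih.1
      · show (if l = "" then _ else _) = _
        rw [if_neg hl, ih.2 (postStep PySem.Dict.empty l) (postStep_items_ne_nil _ _)]
        simp only [segs, if_neg hl, List.map_cons]
        rfl
    · intro d hd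
      have hdne : d.items.isEmpty = false := by simp [hd]
      by_cases hl : l = ""
      · subst hl
        show (if "" = "" then _ else _) = _
        rw [if_pos rfl, if_neg (by simp [hdne])]
        have ht : List.takeWhile (fun x => decide (x ≠ "")) ("" :: ls) = [] := by
          simp [List.takeWhile]
        have hdr : List.dropWhile (fun x => decide (x ≠ "")) ("" :: ls) = "" :: ls := by
          simp [List.dropWhile]
        rw [ht, hdr, List.foldl_nil, ih.1]
        simp [segs]
      · show (if l = "" then _ else _) = _
        rw [if_neg hl, ih.2 (postStep d l) (postStep_items_ne_nil _ _)]
        have ht : List.takeWhile (fun x => decide (x ≠ "")) (l :: ls)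
            = l :: List.takeWhile (fun x => decide (x ≠ "")) ls := by
          simp [List.takeWhile, hl]
        have hdr : List.dropWhile (fun x => decide (x ≠ "")) (l :: ls)
            = List.dropWhile (fun x => decide (x ≠ "")) ls := by
          simp [List.dropWhile, hl]
        rw [ht, hdr, List.foldl_cons]

-- ===== VERDICT (by name: the statement is the Claim_ definition above) =====
theorem extract_posts_py_spec : Claim_equal_extract_posts_py := by
  intro content _
  unfold Spec_extract_posts_py extract_posts_py extract_posts_py_alt
  rw [foldl_eq_runA, List.nil_append, (runA_segs _).1, List.map_map]
  rfl
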